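-- pv_equiv track=rewrite | github.com/Arewa100/mypythoncodes | firstcode/myclasswork/strings/string_functions/src/strings/character_functions.py | character_placer
-- ===== SOURCE A (Python) =====
-- def character_placer(first_string, second_string):
--     the_second_string = second_string + ""
--     combined_strings = ""
--     SECOND_STRING_LENGTH = len(the_second_string)
--     FIRST_STRING_LENGTH = len(first_string)
--     NEW_LENGTH = SECOND_STRING_LENGTH + FIRST_STRING_LENGTH
--     if SECOND_STRING_LENGTH % 2 == 0:
--         new_index = SECOND_STRING_LENGTH // 2
--         for count in range(SECOND_STRING_LENGTH):
--             if count == new_index: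
--                 combined_strings += first_string[0]
--             elif count == new_index + 1:
--                 combined_strings += first_string[1]
--             else:
--                 combined_strings += the_second_string[count]
--
--     return combined_strings
-- ===== SOURCE B (Python) =====
-- def character_placer(first_string, second_string):
--     n = len(second_string)
--     if n == 0 or n % 2 == 1:
--         return ""
--     mid = n // 2
--     return second_string[:mid] + first_string[:2] + second_string[mid + 2:]
-- ===== Notes on version B (the rewrite author's own statement) =====
-- stated objective: simpler
-- what changed: Replaces the per-character loop with index-comparison branches by a one-line assembly from slices (second[:mid] + first[:2] + second[mid+2:]); the precondition excludes only inputs where A raises IndexError (first_string too short for an even-length second_string).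
-- intended difference: When len(second_string)==2 and first_string has at least 2 characters, A returns second[0]+first[0], silently dropping first[1] because mid+1 falls outside its loop range; B returns second[0]+first[0]+first[1], placing both replacement characters as intended. — e.g. on character_placer("ab", "xy"): A returns "xa", B returns "xab"
import Mathlib
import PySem

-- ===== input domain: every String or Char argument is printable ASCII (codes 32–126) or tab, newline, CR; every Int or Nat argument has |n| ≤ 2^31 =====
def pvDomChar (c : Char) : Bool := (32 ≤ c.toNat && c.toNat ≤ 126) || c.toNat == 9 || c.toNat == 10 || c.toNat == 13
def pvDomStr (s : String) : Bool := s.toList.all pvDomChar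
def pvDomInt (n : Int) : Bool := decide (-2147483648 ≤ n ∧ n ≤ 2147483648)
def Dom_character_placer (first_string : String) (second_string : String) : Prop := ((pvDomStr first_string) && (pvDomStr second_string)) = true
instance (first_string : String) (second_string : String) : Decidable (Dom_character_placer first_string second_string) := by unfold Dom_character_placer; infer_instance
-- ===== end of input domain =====

-- B replaces A's per-character loop by a one-line assembly from slices (objective: simpler).

-- ===== PORT A =====
-- the character A's loop body picks at position `count` (none = IndexError)
def pvSelA (fl s2 : List Char) (mid count : Nat) : Option Char :=
  if count = mid then PySem.List.pyGet? fl 0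
  else if count = mid + 1 then PySem.List.pyGet? fl 1
  else PySem.List.pyGet? s2 (count : Int)

-- one loop step of A: append the chosen character, propagating IndexError as none
def pvStepA (fl s2 : List Char) (mid : Nat) (acc : Option (List Char)) (count : Nat) : Option (List Char) :=
  acc.bind fun a => (pvSelA fl s2 mid count).map (fun c => a ++ [c])

def character_placer (first_string : String) (second_string : String) : String :=
  let the_second_string := second_string.toList ++ []   -- second_string + ""
  let SECOND_STRING_LENGTH := the_second_string.length
  let combined_strings : Option (List Char) :=
    if SECOND_STRING_LENGTH % 2 = 0 then
      let new_index := SECOND_STRING_LENGTH / 2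
      (List.range SECOND_STRING_LENGTH).foldl
        (pvStepA first_string.toList the_second_string new_index) (some [])
    else some []
  String.ofList (combined_strings.getD [])   -- none only outside Pre_ (IndexError)

-- ===== PORT B =====
def character_placer_alt (first_string : String) (second_string : String) : String :=
  let s := second_string.toList
  let n := s.length
  if n = 0 ∨ n % 2 = 1 then ""
  else
    let mid := n / 2
    String.ofList (PySem.List.slice s none (some (mid : Int)) ++
                   PySem.List.slice first_string.toList none (some 2) ++
                   PySem.List.slice s (some ((mid : Int) + 2)) none)

-- ===== PRECONDITION & SPEC =====
-- Pre_ excludes exactly the inputs where A raises IndexError: an even-length second string of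
-- length ≥ 2 makes A read first_string[0], and of length ≥ 4 also first_string[1].
def Pre_character_placer (first_string : String) (second_string : String) : Prop :=
  second_string.toList.length % 2 = 0 →
    (2 ≤ second_string.toList.length → 1 ≤ first_string.toList.length) ∧
    (4 ≤ second_string.toList.length → 2 ≤ first_string.toList.length)
instance (first_string : String) (second_string : String) : Decidable (Pre_character_placer first_string second_string) := by unfold Pre_character_placer; infer_instance

def pvWitness_character_placer : String × String := ("ab", "wxyz")

-- When len(second_string)==2 and first_string has ≥ 2 characters, A returns second[0]+first[0],
-- silently dropping first[1] because mid+1 falls outside its loop range; B returns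
-- second[0]+first[0]+first[1], placing both replacement characters as intended.
def D_character_placer (first_string : String) (second_string : String) : Prop :=
  second_string.toList.length = 2 ∧ 2 ≤ first_string.toList.length
instance (first_string : String) (second_string : String) : Decidable (D_character_placer first_string second_string) := by unfold D_character_placer; infer_instance

def Spec_character_placer (first_string : String) (second_string : String) (out : String) : Prop :=
  ¬ D_character_placer first_string second_string → out = character_placer_alt first_string second_string
instance (first_string : String) (second_string : String) (out : String) : Decidable (Spec_character_placer first_string second_string out) := by unfold Spec_character_placer; infer_instance

def pvDiffWitness_character_placer : String × String := ("ab", "xy")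
def pvDiffWitnessOut_character_placer : String × String := ("xa", "xab")


-- ===== CLAIM (what is proved, stated in full; the proofs are below) =====
def Claim_unchanged_character_placer : Prop := ∀ (first_string : String) (second_string : String), Dom_character_placer first_string second_string → Pre_character_placer first_string second_string → Spec_character_placer first_string second_string (character_placer first_string second_string)
def Claim_changed_character_placer : Prop := Dom_character_placer (pvDiffWitness_character_placer.1) (pvDiffWitness_character_placer.2) ∧ Pre_character_placer (pvDiffWitness_character_placer.1) (pvDiffWitness_character_placer.2) ∧ D_character_placer (pvDiffWitness_character_placer.1) (pvDiffWitness_character_placer.2) ∧ character_placer (pvDiffWitness_character_placer.1) (pvDiffWitness_character_placer.2) = pvDiffWitnessOut_character_placer.1 ∧ character_placer_alt (pvDiffWitness_character_placer.1) (pvDiffWitness_character_placer.2) = pvDiffWitnessOut_character_placer.2 ∧ pvDiffWitnessOut_character_placer.1 ≠ pvDiffWitnessOut_character_placer.2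
def Claim_exact_character_placer : Prop := ∀ (first_string : String) (second_string : String), Dom_character_placer first_string second_string → Pre_character_placer first_string second_string → D_character_placer first_string second_string → character_placer first_string second_string ≠ character_placer_alt first_string second_string

-- ===== LEMMAS AND PROOFS =====

-- A's loop builds the list of selected characters when every selection succeeds
theorem pv_foldA (fl s2 : List Char) (mid : Nat) (l : List Nat) (h : Nat → Char)
    (hh : ∀ i ∈ l, pvSelA fl s2 mid i = some (h i)) :
    ∀ a, l.foldl (pvStepA fl s2 mid) (some a) = some (a ++ l.map h) := by
  induction l with
  | nil => intro a; simp
  | cons hd tl ih =>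
      intro a
      have := hh hd (by simp)
      simp only [List.foldl_cons, pvStepA, this, Option.bind_some, Option.map_some, List.map_cons]
      rw [ih (fun i hi => hh i (by simp [hi]))]
      simp

-- the selected characters of a length-2 second string: its first char, then first_string[0]
theorem pv_assemble2 (s2 fl : List Char) (h2 : s2.length = 2) :
    List.map (fun i => if i = 1 then fl.getD 0 ' ' else if i = 2 then fl.getD 1 ' ' else s2.getD i ' ')
      (List.range 2) = List.take 1 s2 ++ [fl.getD 0 ' '] := by
  match s2, h2 with
  | [a, b], _ => simp [List.range_succ, List.getD]

-- the selected characters of an even second string of length ≥ 4: slice, two chars, slice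
theorem pv_assemble4 (s2 fl : List Char) (n mid : Nat) (hn : n = s2.length) (hmid : mid = n / 2)
    (hev : n % 2 = 0) (hn4 : 4 ≤ n) :
    List.map (fun i => if i = mid then fl.getD 0 ' ' else if i = mid + 1 then fl.getD 1 ' ' else s2.getD i ' ')
      (List.range n) =
    List.take mid s2 ++ [fl.getD 0 ' '] ++ [fl.getD 1 ' '] ++ List.drop (mid + 2) s2 := by
  have hmn : mid + 2 ≤ n := by omega
  have hmids : mid ≤ s2.length := by omega
  apply List.ext_getElem
  · simp; omega
  · intro i hi hi'
    simp only [List.getElem_map, List.getElem_range]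
    have hilen : i < n := by simpa using hi
    simp only [List.getElem_append, List.length_append, List.length_take, List.length_cons,
      List.length_nil, Nat.min_eq_left hmids]
    by_cases h1 : i < mid
    · rw [if_neg (by omega), if_neg (by omega), dif_pos (by omega), dif_pos (by omega),
          dif_pos (by omega), List.getElem_take, List.getD_eq_getElem _ _ (by omega)]
    · by_cases h2 : i = mid
      · rw [if_pos h2, dif_pos (by omega), dif_pos (by omega), dif_neg (by omega)]
        simp [h2]
      · by_cases h3 : i = mid + 1
        · rw [if_neg h2, if_pos h3, dif_pos (by omega), dif_neg (by omega)]
          simp [h3]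
        · rw [if_neg h2, if_neg h3, dif_neg (by omega), List.getElem_drop,
              List.getD_eq_getElem _ _ (by omega)]
          congr 1
          omega

-- first two characters of a list of length ≥ 2, as getD values
theorem pv_take2 (fl : List Char) (h : 2 ≤ fl.length) :
    List.take 2 fl = [fl.getD 0 ' ', fl.getD 1 ' '] := by
  match fl, h with
  | a :: b :: t, _ => simp [List.getD]

theorem pv_take2_one (fl : List Char) (h : fl.length = 1) :
    List.take 2 fl = [fl.getD 0 ' '] := by
  match fl, h with
  | [a], _ => simp [List.getD]

-- ===== VERDICT (by name: the statement is the Claim_ definition above) =====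
theorem character_placer_spec : Claim_unchanged_character_placer := by
  intro f s _ hpre
  unfold Spec_character_placer
  intro hnd
  unfold character_placer character_placer_alt
  simp only [List.append_nil]
  by_cases hev : s.toList.length % 2 = 0
  · obtain ⟨h1, h2⟩ := hpre hev
    by_cases h0 : s.toList.length = 0
    · simp [h0]
    · have hn2 : 2 ≤ s.toList.length := by omega
      have hf0 : 1 ≤ f.toList.length := h1 hn2
      have hget0 : PySem.List.pyGet? f.toList 0 = some (f.toList.getD 0 ' ') := by
        rw [PySem.List.pyGet?_zero, List.getElem?_eq_getElem (by omega),
            List.getD_eq_getElem _ _ (by omega)]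
      have hsel : ∀ i ∈ List.range s.toList.length,
          pvSelA f.toList s.toList (s.toList.length / 2) i =
          some (if i = s.toList.length / 2 then f.toList.getD 0 ' '
                else if i = s.toList.length / 2 + 1 then f.toList.getD 1 ' '
                else s.toList.getD i ' ') := by
        intro i hi
        have hi' : i < s.toList.length := List.mem_range.mp hi
        unfold pvSelA
        split_ifs with e1 e2
        · exact hget0
        · have hn4 : 4 ≤ s.toList.length := by omega
          have hf1 : 2 ≤ f.toList.length := h2 hn4
          have hc : PySem.List.pyGet? f.toList (1 : Int) = f.toList[(1 : Nat)]? := by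
            exact_mod_cast PySem.List.pyGet?_natCast f.toList 1
          rw [hc, List.getElem?_eq_getElem (by omega), List.getD_eq_getElem _ _ (by omega)]
        · rw [PySem.List.pyGet?_natCast, List.getElem?_eq_getElem (by omega),
              List.getD_eq_getElem _ _ (by omega)]
      rw [if_pos hev, pv_foldA _ _ _ _ _ hsel []]
      simp only [List.nil_append, Option.getD_some]
      rw [if_neg (by omega), PySem.List.slice_to_natCast]
      have hs2 : PySem.List.slice f.toList none (some 2) = List.take 2 f.toList := by
        have := PySem.List.slice_to_natCast f.toList 2
        exact_mod_cast this
      by_cases h2n : s.toList.length = 2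
      · -- n = 2; ¬D gives |f| ≤ 1, so |f| = 1
        have hfe : f.toList.length = 1 := by
          rcases Nat.lt_or_ge f.toList.length 2 with h | h
          · omega
          · exact absurd ⟨h2n, h⟩ hnd
        simp only [h2n, Nat.reduceDiv, Nat.reduceAdd]
        rw [pv_assemble2 s.toList f.toList h2n, hs2, pv_take2_one f.toList hfe]
        have hdrop : PySem.List.slice s.toList (some (((1 : Nat) : Int) + 2)) none = List.drop 3 s.toList := by
          have h3 : ((1 : Nat) : Int) + 2 = ((3 : Nat) : Int) := by norm_num
          rw [h3, PySem.List.slice_from_natCast]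
        rw [hdrop, List.drop_eq_nil_of_le (by omega)]
        simp
      · have hn4 : 4 ≤ s.toList.length := by omega
        have hf1 : 2 ≤ f.toList.length := h2 hn4
        have hcast : ((s.toList.length / 2 : Nat) : Int) + 2 = ((s.toList.length / 2 + 2 : Nat) : Int) := by
          push_cast; ring
        rw [hcast, PySem.List.slice_from_natCast, hs2, pv_take2 f.toList hf1,
            pv_assemble4 s.toList f.toList s.toList.length (s.toList.length / 2) rfl rfl hev hn4]
        simp
  · rw [if_neg hev, if_pos (by omega)]
    simp

theorem character_placer_changed : Claim_changed_character_placer := by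
  unfold Claim_changed_character_placer; decide

theorem character_placer_tight : Claim_exact_character_placer := by
  intro f s _ hpre hd
  obtain ⟨h2n, hf2⟩ := hd
  have hev : s.toList.length % 2 = 0 := by omega
  have hget0 : PySem.List.pyGet? f.toList 0 = some (f.toList.getD 0 ' ') := by
    rw [PySem.List.pyGet?_zero, List.getElem?_eq_getElem (by omega),
        List.getD_eq_getElem _ _ (by omega)]
  have hsel : ∀ i ∈ List.range s.toList.length,
      pvSelA f.toList s.toList (s.toList.length / 2) i =
      some (if i = s.toList.length / 2 then f.toList.getD 0 ' '
            else if i = s.toList.length / 2 + 1 then f.toList.getD 1 ' '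
            else s.toList.getD i ' ') := by
    intro i hi
    have hi' : i < s.toList.length := List.mem_range.mp hi
    unfold pvSelA
    split_ifs with e1 e2
    · exact hget0
    · omega
    · rw [PySem.List.pyGet?_natCast, List.getElem?_eq_getElem (by omega),
          List.getD_eq_getElem _ _ (by omega)]
  -- A's output has length 2, B's has length ≥ 3
  intro heq
  have hA : (character_placer f s).toList.length = 2 := by
    unfold character_placer
    simp only [List.append_nil]
    rw [if_pos hev, pv_foldA _ _ _ _ _ hsel []]
    simp [h2n]
  have hB : 3 ≤ (character_placer_alt f s).toList.length := by
    unfold character_placer_alt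
    rw [if_neg (by omega)]
    have hs2 : PySem.List.slice f.toList none (some 2) = List.take 2 f.toList := by
      have := PySem.List.slice_to_natCast f.toList 2
      exact_mod_cast this
    show 3 ≤ (String.ofList (PySem.List.slice s.toList none (some ((s.toList.length / 2 : Nat) : Int)) ++
        PySem.List.slice f.toList none (some 2) ++
        PySem.List.slice s.toList (some (((s.toList.length / 2 : Nat) : Int) + 2)) none)).toList.length
    have hcast : ((s.toList.length / 2 : Nat) : Int) + 2 = ((s.toList.length / 2 + 2 : Nat) : Int) := by
      push_cast; ring
    rw [PySem.List.slice_to_natCast, hs2, hcast, PySem.List.slice_from_natCast]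
    simp only [String.toList_ofList, List.length_append, List.length_take, List.length_drop]
    omega
  rw [heq] at hA
  omega
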